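-- pv_equiv track=rewrite | github.com/durham-abric/ecse429_final | generateMutants.py | findOperations
-- ===== SOURCE A (Python) =====
-- targetOps = ["+", "-", "*", "/"]
--
-- def findOperations(line):
--     #Ignore the line if empty
--     if not line: return None
--     #Store position & type of all target operations in the line
--     foundOps = []
--     for position in range(len(line)):
--         character = line[position]
--         #If remainder of line is commented out, ignore possible mutations
--         if character == "#": break
--         #If a possible mutation is found, store its (position, operation)
--         elif character in targetOps: foundOps.append((position, character))
--     #Return None if no possible mutations found, else return the (position, operation) of all possible mutations
--     if not foundOps: return None
--     else: return foundOps
-- ===== SOURCE B (Python) =====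
-- targetOps = ["+", "-", "*", "/"]
--
-- def findOperations(line):
--     if not line: return None
--     #Drop the commented-out suffix, then collect positions operator by operator
--     head = line.partition("#")[0]
--     found = []
--     for op in targetOps:
--         for i, c in enumerate(head):
--             if c == op:
--                 found.append((i, op))
--     #Merge the per-operator groups back into position order
--     found.sort(key=lambda p: p[0])
--     return found or None
-- ===== Notes on version B (the rewrite author's own statement) =====
-- stated objective: alternative
-- what changed: B drops the comment suffix, then traverses operator-by-operator (one pass per target operator collecting that operator's positions) and finally sorts the combined list by position, instead of A's single position-major scan with an in-loop break and accumulator.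
import Mathlib
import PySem

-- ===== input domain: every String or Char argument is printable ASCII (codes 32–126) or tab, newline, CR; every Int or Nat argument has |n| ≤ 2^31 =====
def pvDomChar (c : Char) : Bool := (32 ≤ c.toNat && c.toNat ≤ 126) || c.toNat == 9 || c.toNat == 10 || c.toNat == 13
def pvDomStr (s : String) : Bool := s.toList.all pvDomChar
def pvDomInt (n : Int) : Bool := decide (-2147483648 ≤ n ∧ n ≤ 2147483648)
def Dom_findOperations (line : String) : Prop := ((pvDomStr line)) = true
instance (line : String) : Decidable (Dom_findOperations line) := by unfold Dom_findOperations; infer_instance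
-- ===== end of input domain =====

-- B drops the comment suffix, collects positions operator-by-operator (one pass per operator) and sorts by position; alternative algorithm, A = B is proved on the whole domain.

def pvTargetOps : List String := ["+", "-", "*", "/"]

-- ===== PORT A =====
-- A's for-loop over range(len(line)) with break on '#': recursion carrying index and accumulator
def pvLoopA : List Char → Int → List (Int × String) → List (Int × String)
  | [], _, acc => acc
  | c :: rest, i, acc =>
      if String.ofList [c] = "#" then acc
      else if String.ofList [c] ∈ pvTargetOps then pvLoopA rest (i + 1) (acc ++ [(i, String.ofList [c])])
      else pvLoopA rest (i + 1) acc

def findOperations (line : String) : Option (List (Int × String)) :=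
  if line.toList = [] then none
  else
    let foundOps := pvLoopA line.toList 0 []
    if foundOps = [] then none else some foundOps

-- ===== PORT B =====
-- head = line.partition("#")[0]: the characters before the first '#' (exact for a one-char separator);
-- then for each op in targetOps one pass appending (i, op) where head[i] == op; finally found.sort(key=lambda p: p[0])
def findOperations_alt (line : String) : Option (List (Int × String)) :=
  if line.toList = [] then none
  else
    let head := line.toList.takeWhile (fun c => c ≠ '#')
    let found := pvTargetOps.foldl (fun acc op =>
      (PySem.List.enumerate head 0).foldl (fun acc2 p =>
        if String.ofList [p.2] = op then acc2 ++ [(p.1, op)] else acc2) acc) []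
    let found2 := PySem.List.sorted found (fun p => p.1) false
    if found2 = [] then none else some found2

-- ===== PRECONDITION & SPEC =====
def Spec_findOperations (line : String) (out : Option (List (Int × String))) : Prop := out = findOperations_alt line
instance (line : String) (out : Option (List (Int × String))) : Decidable (Spec_findOperations line out) := by unfold Spec_findOperations; infer_instance

-- ===== CLAIM (what is proved, stated in full; the proofs are below) =====
def Claim_equal_findOperations : Prop := ∀ (line : String), Dom_findOperations line → Spec_findOperations line (findOperations line)

-- ===== LEMMAS AND PROOFS =====

-- the ascending position-major list of operator pairs in cs (starting index i)
def pvCollect (cs : List Char) (i : Int) : List (Int × String) :=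
  ((PySem.List.enumerate cs i).filter (fun p => String.ofList [p.2] ∈ pvTargetOps)).map
    (fun p => (p.1, String.ofList [p.2]))

theorem pvCollect_cons (c : Char) (cs : List Char) (i : Int) :
    pvCollect (c :: cs) i =
      (if String.ofList [c] ∈ pvTargetOps then [((i : Int), String.ofList [c])] else []) ++ pvCollect cs (i + 1) := by
  by_cases hop : String.ofList [c] ∈ pvTargetOps
  · simp [pvCollect, PySem.List.enumerate_cons, hop]
  · simp [pvCollect, PySem.List.enumerate_cons, hop]

theorem pvOfList_ne_hash (c : Char) (hc : c ≠ '#') : ¬ String.ofList [c] = "#" := by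
  intro h
  exact hc (by simpa using congrArg String.toList h)

-- A's loop result is the ascending list over the pre-'#' prefix
theorem pvLoopA_eq (cs : List Char) (i : Int) (acc : List (Int × String)) :
    pvLoopA cs i acc = acc ++ pvCollect (cs.takeWhile (fun c => c ≠ '#')) i := by
  induction cs generalizing i acc with
  | nil => simp [pvLoopA, pvCollect]
  | cons c rest ih =>
    by_cases hc : c = '#'
    · subst hc
      simp [pvLoopA, List.takeWhile, pvCollect]
    · have htw : (c :: rest).takeWhile (fun c => c ≠ '#') = c :: rest.takeWhile (fun c => c ≠ '#') := by
        simp [List.takeWhile, hc]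
      rw [htw, pvCollect_cons]
      by_cases hop : String.ofList [c] ∈ pvTargetOps
      · simp [pvLoopA, pvOfList_ne_hash c hc, hop, ih]
      · simp [pvLoopA, pvOfList_ne_hash c hc, hop, ih]

-- a filter by a disjunction of disjoint tests is a permutation of the two filters appended
theorem pvFilterOrPerm {α : Type} (p q : α → Bool) (E : List α)
    (hdisj : ∀ x, ¬ (p x = true ∧ q x = true)) :
    (E.filter (fun x => p x || q x)).Perm (E.filter p ++ E.filter q) := by
  induction E with
  | nil => simp
  | cons a t ih =>
    by_cases hp : p a = true
    · have hq : q a = false := by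
        cases hqa : q a
        · rfl
        · exact absurd ⟨hp, hqa⟩ (hdisj a)
      simpa [List.filter, hp, hq] using ih.cons a
    · have hp' : p a = false := by simpa using hp
      by_cases hq : q a = true
      · have h1 := (ih.cons a).trans
          (List.perm_middle (a := a) (l₁ := t.filter p) (l₂ := t.filter q)).symm
        simpa [List.filter, hp', hq] using h1
      · have hq' : q a = false := by simpa using hq
        simpa [List.filter, hp', hq'] using ih

-- filtering by membership in a duplicate-free list permutes into per-element filters
theorem pvFilterMemPerm {α : Type} (g : α → String) (E : List α) :
    ∀ (ops : List String), ops.Nodup →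
      (E.filter (fun x => decide (g x ∈ ops))).Perm
        (ops.flatMap (fun op => E.filter (fun x => decide (g x = op)))) := by
  intro ops
  induction ops with
  | nil => simp
  | cons o rest ih =>
    intro hnd
    have hnd' : rest.Nodup := hnd.of_cons
    have ho : o ∉ rest := by
      intro h; exact (List.nodup_cons.mp hnd).1 h
    have hsplit : (E.filter (fun x => decide (g x ∈ o :: rest))).Perm
        (E.filter (fun x => decide (g x = o)) ++ E.filter (fun x => decide (g x ∈ rest))) := by
      have hcongr : E.filter (fun x => decide (g x ∈ o :: rest)) =
          E.filter (fun x => decide (g x = o) || decide (g x ∈ rest)) := by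
        apply List.filter_congr
        intro x _
        simp [List.mem_cons]
      rw [hcongr]
      apply pvFilterOrPerm
      intro x ⟨h1, h2⟩
      have e1 : g x = o := by simpa using h1
      have e2 : g x ∈ rest := by simpa using h2
      exact ho (e1 ▸ e2)
    have h2 : (E.filter (fun x => decide (g x = o)) ++ E.filter (fun x => decide (g x ∈ rest))).Perm
        (E.filter (fun x => decide (g x = o)) ++
          rest.flatMap (fun op => E.filter (fun x => decide (g x = op)))) :=
      List.Perm.append_left _ (ih hnd')
    have h3 : (o :: rest).flatMap (fun op => E.filter (fun x => decide (g x = op))) =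
        E.filter (fun x => decide (g x = o)) ++
          rest.flatMap (fun op => E.filter (fun x => decide (g x = op))) := by
      simp
    rw [h3]
    exact hsplit.trans h2

-- B's double loop produces a permutation of the ascending list
theorem pvFoundPerm (head : List Char) :
    (pvCollect head 0).Perm
      (pvTargetOps.foldl (fun acc op =>
        (PySem.List.enumerate head 0).foldl (fun acc2 p =>
          if String.ofList [p.2] = op then acc2 ++ [(p.1, op)] else acc2) acc) []) := by
  -- rewrite the loops as a flatMap of filtered maps
  have hinner : ∀ (op : String) (acc : List (Int × String)),
      (PySem.List.enumerate head 0).foldl (fun acc2 p =>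
          if String.ofList [p.2] = op then acc2 ++ [(p.1, op)] else acc2) acc =
        acc ++ ((PySem.List.enumerate head 0).filter
          (fun p => decide (String.ofList [p.2] = op))).map (fun p => (p.1, op)) := by
    intro op acc
    exact PySem.List.foldl_append_ite (fun (p : Int × Char) => String.ofList [p.2] = op) (fun (p : Int × Char) => (p.1, op)) _ _
  have houter : (pvTargetOps.foldl (fun acc op =>
        (PySem.List.enumerate head 0).foldl (fun acc2 p =>
          if String.ofList [p.2] = op then acc2 ++ [(p.1, op)] else acc2) acc) []) =
      pvTargetOps.flatMap (fun op => ((PySem.List.enumerate head 0).filter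
          (fun p => decide (String.ofList [p.2] = op))).map (fun p => (p.1, op))) := by
    have := PySem.List.foldl_congr_mem
      (f := fun acc op =>
        (PySem.List.enumerate head 0).foldl (fun acc2 p =>
          if String.ofList [p.2] = op then acc2 ++ [(p.1, op)] else acc2) acc)
      (g := fun acc op => acc ++ ((PySem.List.enumerate head 0).filter
          (fun p => decide (String.ofList [p.2] = op))).map (fun p => (p.1, op)))
      (l := pvTargetOps) (init := ([] : List (Int × String)))
      (by intro acc op _; exact hinner op acc)
    rw [this]
    simpa using PySem.List.foldl_append_eq_flatMap
      (g := fun op => ((PySem.List.enumerate head 0).filter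
          (fun p => decide (String.ofList [p.2] = op))).map (fun p => (p.1, op)))
      (l := pvTargetOps) (acc := ([] : List (Int × String)))
  rw [houter]
  -- per-op, mapping to (p.1, op) equals mapping to (p.1, ofList [p.2]) on the filtered list
  have hmap : ∀ op : String, ((PySem.List.enumerate head 0).filter
        (fun p => decide (String.ofList [p.2] = op))).map (fun p => (p.1, op)) =
      ((PySem.List.enumerate head 0).filter
        (fun p => decide (String.ofList [p.2] = op))).map (fun p => (p.1, String.ofList [p.2])) := by
    intro op
    apply List.map_congr_left
    intro p hp
    have := (List.mem_filter.mp hp).2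
    have heq : String.ofList [p.2] = op := by simpa using this
    rw [heq]
  have hflat : pvTargetOps.flatMap (fun op => ((PySem.List.enumerate head 0).filter
        (fun p => decide (String.ofList [p.2] = op))).map (fun p => (p.1, op))) =
      (pvTargetOps.flatMap (fun op => (PySem.List.enumerate head 0).filter
        (fun p => decide (String.ofList [p.2] = op)))).map (fun p => (p.1, String.ofList [p.2])) := by
    rw [List.map_flatMap]
    exact List.flatMap_congr (fun op _ => hmap op)
  rw [hflat]
  unfold pvCollect
  apply List.Perm.map
  have hnd : pvTargetOps.Nodup := by decide
  simpa using pvFilterMemPerm (fun p => String.ofList [p.2]) (PySem.List.enumerate head 0) pvTargetOps hnd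

-- the ascending list is strictly increasing in position
theorem pvCollectPairwise (cs : List Char) (i : Int) :
    (pvCollect cs i).Pairwise (fun a b => a.1 < b.1) := by
  unfold pvCollect
  apply List.Pairwise.map
  · intro a b h; exact h
  · exact (PySem.List.pairwise_lt_enumerate cs i).filter _

-- B's sorted result is exactly the ascending list
theorem pvSortedEq (head : List Char) :
    PySem.List.sorted (pvTargetOps.foldl (fun acc op =>
        (PySem.List.enumerate head 0).foldl (fun acc2 p =>
          if String.ofList [p.2] = op then acc2 ++ [(p.1, op)] else acc2) acc) [])
      (fun p => p.1) false = pvCollect head 0 := by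
  apply PySem.List.sorted_eq_of_perm_of_pairwise_lt
  · exact pvFoundPerm head
  · exact pvCollectPairwise head 0

-- ===== VERDICT (by name: the statement is the Claim_ definition above) =====
theorem findOperations_spec : Claim_equal_findOperations := by
  intro line _
  unfold Spec_findOperations findOperations findOperations_alt
  by_cases hnil : line.toList = []
  · rw [if_pos hnil, if_pos hnil]
  · rw [if_neg hnil, if_neg hnil]
    simp only [pvSortedEq, pvLoopA_eq line.toList 0 [], List.nil_append]
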